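-- pv_equiv track=rewrite | github.com/yywutong/yuanyuan | algorithm/双指针_替换数字.py | replace_element
-- ===== SOURCE A (Python) =====
-- def replace_element(s):
--     s = list(s)
--     count = 0
--     for sss in s:
--         if "0" <= sss <= "9":
--             count += 1
--     ss = s + ["0"] * (5 * count)
--
--     i = len(s) - 1
--     j = len(ss) - 1
--     while i >= 0 and j >= 0:
--         if "0" <= ss[i] <= "9":
--             ss[j] = "r"
--             ss[j - 1] = "e"
--             ss[j - 2] = "b"
--             ss[j - 3] = "m"
--             ss[j - 4] = "u"
--             ss[j - 5] = "n"
--             j -= 6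
--         else:
--             ss[j] = ss[i]
--             j -= 1
--         i -= 1
--     return "".join(ss)
-- ===== SOURCE B (Python) =====
-- def replace_element(s):
--     res = []
--     for ch in s:
--         if "0" <= ch <= "9":
--             res.append("number")
--         else:
--             res.append(ch)
--     return "".join(res)
-- ===== Notes on version B (the rewrite author's own statement) =====
-- stated objective: simpler
-- what changed: Replaced A's count-digits pass, pre-extension with filler characters and backward two-pointer in-place overwrite by a single forward pass that appends the replacement word or the character to a result list and joins it.
import Mathlib
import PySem

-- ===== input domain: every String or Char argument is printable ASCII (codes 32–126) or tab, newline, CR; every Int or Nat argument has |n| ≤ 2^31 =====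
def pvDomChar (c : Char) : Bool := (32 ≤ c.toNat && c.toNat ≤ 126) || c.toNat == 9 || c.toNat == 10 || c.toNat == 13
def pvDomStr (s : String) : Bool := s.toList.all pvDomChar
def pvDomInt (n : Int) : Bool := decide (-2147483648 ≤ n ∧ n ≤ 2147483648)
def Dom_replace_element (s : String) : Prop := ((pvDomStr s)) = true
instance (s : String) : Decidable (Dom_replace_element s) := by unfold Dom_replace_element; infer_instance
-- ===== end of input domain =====

-- B replaces A's count-digits / pre-extend-with-fillers / backward two-pointer in-place fill
-- with a single forward accumulating pass (objective: simpler). Return value only; neither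
-- version mutates its argument.

-- ===== PORT A =====
-- A's while loop; i walks the original characters right to left, j is the write position.
-- Every index A reads or writes is in range on every input (proved by the invariant below),
-- where pyGetD/pySetD are exact.
def pvLoopA (ss : List Char) (i j : Int) : List Char :=
  if h : 0 ≤ i ∧ 0 ≤ j then
    if '0' ≤ PySem.List.pyGetD ss i ' ' ∧ PySem.List.pyGetD ss i ' ' ≤ '9' then
      pvLoopA (PySem.List.pySetD (PySem.List.pySetD (PySem.List.pySetD (PySem.List.pySetD
        (PySem.List.pySetD (PySem.List.pySetD ss j 'r') (j-1) 'e') (j-2) 'b')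
        (j-3) 'm') (j-4) 'u') (j-5) 'n') (i-1) (j-6)
    else
      pvLoopA (PySem.List.pySetD ss j (PySem.List.pyGetD ss i ' ')) (i-1) (j-1)
  else ss
termination_by (i+1).toNat
decreasing_by all_goals omega

def replace_element (s : String) : String :=
  let sl := s.toList
  let count : Int := sl.foldl (fun c ch => if '0' ≤ ch ∧ ch ≤ '9' then c + 1 else c) 0
  let ss := sl ++ List.replicate (5 * count).toNat '0'
  String.ofList (pvLoopA ss ((sl.length : Int) - 1) ((ss.length : Int) - 1))

-- ===== PORT B =====
def replace_element_alt (s : String) : String :=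
  String.ofList (s.toList.foldl
    (fun res ch => if '0' ≤ ch ∧ ch ≤ '9' then res ++ "number".toList else res ++ [ch]) [])


-- ===== PRECONDITION & SPEC =====
def Spec_replace_element (s : String) (out : String) : Prop := out = replace_element_alt s
instance (s : String) (out : String) : Decidable (Spec_replace_element s out) := by unfold Spec_replace_element; infer_instance

-- ===== CLAIM (what is proved, stated in full; the proofs are below) =====
def Claim_equal_replace_element : Prop := ∀ (s : String), Dom_replace_element s → Spec_replace_element s (replace_element s)

-- ===== LEMMAS AND PROOFS =====

def pvT (c : Char) : List Char := if '0' ≤ c ∧ c ≤ '9' then "number".toList else [c]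

lemma pvCount_foldl (l : List Char) (a : Int) :
    l.foldl (fun c ch => if '0' ≤ ch ∧ ch ≤ '9' then c + 1 else c) a
      = a + l.countP (fun ch => decide ('0' ≤ ch ∧ ch ≤ '9')) := by
  induction l generalizing a with
  | nil => simp
  | cons x xs ih =>
    simp only [List.foldl_cons, List.countP_cons, ih]
    by_cases h : '0' ≤ x ∧ x ≤ '9'
    · simp [h]; ring
    · simp [h]

lemma pvRead (p rest : List Char) (c : Char) :
    PySem.List.pyGetD (p ++ c :: rest) ((p.length : Nat) : Int) ' ' = c := by
  rw [PySem.List.pyGetD_natCast, List.getD_append_right _ _ _ _ (le_refl p.length)]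
  simp [List.getD]

lemma pvWrite1 (front done : List Char) (b v : Char) :
    (front ++ b :: done).set front.length v = front ++ v :: done := by
  induction front with
  | nil => simp
  | cons a f ih => simp [ih]

lemma pvWrite6 (front done : List Char) (b0 b1 b2 b3 b4 b5 : Char) :
    ((((((front ++ b0::b1::b2::b3::b4::b5::done).set (front.length+5) 'r').set
      (front.length+4) 'e').set (front.length+3) 'b').set (front.length+2) 'm').set
      (front.length+1) 'u').set front.length 'n'
    = front ++ 'n'::'u'::'m'::'b'::'e'::'r'::done := by
  induction front with
  | nil => simp [List.set]
  | cons a f ih =>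
    simp only [List.cons_append, List.length_cons, List.set_cons_succ, ih]

lemma pvSix (l : List Char) (h : l.length = 6) :
    ∃ b0 b1 b2 b3 b4 b5, l = [b0,b1,b2,b3,b4,b5] := by
  match l, h with
  | [b0,b1,b2,b3,b4,b5], _ => exact ⟨b0,b1,b2,b3,b4,b5, rfl⟩

lemma pvLoop_inv (pre : List Char) : ∀ (g done : List Char),
    g.length = 5 * pre.countP (fun ch => decide ('0' ≤ ch ∧ ch ≤ '9')) →
    pvLoopA (pre ++ g ++ done) ((pre.length : Int) - 1) ((pre.length : Int) + g.length - 1)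
      = pre.flatMap pvT ++ done := by
  induction pre using List.reverseRecOn with
  | nil =>
    intro g done hg
    simp at hg
    rw [pvLoopA]
    simp [hg]
  | append_singleton p c ih =>
    intro g done hg
    have hcnt : List.countP (fun ch => decide ('0' ≤ ch ∧ ch ≤ '9')) (p ++ [c])
        = List.countP (fun ch => decide ('0' ≤ ch ∧ ch ≤ '9')) p + (if '0' ≤ c ∧ c ≤ '9' then 1 else 0) := by
      by_cases hdc : '0' ≤ c ∧ c ≤ '9' <;> simp [List.countP_append, hdc]
    have hread : PySem.List.pyGetD ((p ++ [c]) ++ g ++ done) ((((p ++ [c]).length : Int)) - 1) ' ' = c := by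
      have h1 : (((p ++ [c]).length : Int)) - 1 = ((p.length : Nat) : Int) := by simp
      have h2 : (p ++ [c]) ++ g ++ done = p ++ c :: (g ++ done) := by simp
      rw [h1, h2, pvRead]
    have hcond : (0:Int) ≤ (((p ++ [c]).length : Int)) - 1 ∧ (0:Int) ≤ (((p ++ [c]).length : Int)) + (g.length : Int) - 1 := by
      simp only [List.length_append, List.length_singleton]; push_cast; omega
    rw [pvLoopA, dif_pos hcond, hread]
    by_cases hd : '0' ≤ c ∧ c ≤ '9'
    · -- digit case
      rw [if_pos (by exact hd)]
      have hm5 : g.length = 5 * List.countP (fun ch => decide ('0' ≤ ch ∧ ch ≤ '9')) p + 5 := by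
        rw [hg, hcnt, if_pos hd]; ring
      obtain ⟨b0, b1, b2, b3, b4, b5, hdrop⟩ := pvSix ((c :: g).drop (g.length - 5)) (by simp; omega)
      have hglen : ((c :: g).take (g.length - 5)).length = g.length - 5 := by simp; omega
      have hsplit : (c :: g) = (c :: g).take (g.length - 5) ++ [b0,b1,b2,b3,b4,b5] := by
        rw [← hdrop, List.take_append_drop]
      have hflen : (p ++ (c :: g).take (g.length - 5)).length = p.length + (g.length - 5) := by
        rw [List.length_append, hglen]
      have hss : (p ++ [c]) ++ g ++ done
          = (p ++ (c :: g).take (g.length - 5)) ++ b0::b1::b2::b3::b4::b5::done := by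
        conv_lhs => rw [show (p ++ [c]) ++ g ++ done = p ++ ((c :: g) ++ done) from by simp, hsplit]
        simp
      have e0 : (((p ++ [c]).length : Int)) + (g.length : Int) - 1
          = (((p ++ (c :: g).take (g.length - 5)).length + 5 : Nat) : Int) := by
        rw [hflen]; simp; omega
      rw [hss, e0]
      set front := p ++ (c :: g).take (g.length - 5) with hfront
      rw [show ((front.length + 5 : Nat) : Int) - 1 = ((front.length + 4 : Nat) : Int) from by push_cast; ring]
      rw [show ((front.length + 5 : Nat) : Int) - 2 = ((front.length + 3 : Nat) : Int) from by push_cast; ring]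
      rw [show ((front.length + 5 : Nat) : Int) - 3 = ((front.length + 2 : Nat) : Int) from by push_cast; ring]
      rw [show ((front.length + 5 : Nat) : Int) - 4 = ((front.length + 1 : Nat) : Int) from by push_cast; ring]
      rw [show ((front.length + 5 : Nat) : Int) - 5 = ((front.length : Nat) : Int) from by push_cast; ring]
      simp only [PySem.List.pySetD_natCast]
      rw [pvWrite6]
      rw [show (((p ++ [c]).length : Int)) - 1 - 1 = ((p.length : Int)) - 1 from by simp]
      rw [show ((front.length + 5 : Nat) : Int) - 6
        = ((p.length : Int)) + (((c :: g).take (g.length - 5)).length : Int) - 1 from by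
          rw [hflen, hglen]; push_cast; omega]
      rw [show front ++ 'n'::'u'::'m'::'b'::'e'::'r'::done
        = p ++ (c :: g).take (g.length - 5) ++ ((['n','u','m','b','e','r'] : List Char) ++ done)
        from by rw [hfront]; simp]
      rw [ih _ _ (by rw [hglen]; omega)]
      simp [pvT, hd]
    · -- non-digit case
      rw [if_neg (by exact hd)]
      have hm0 : g.length = 5 * List.countP (fun ch => decide ('0' ≤ ch ∧ ch ≤ '9')) p := by
        rw [hg, hcnt, if_neg hd]; ring
      obtain ⟨b0, hdrop⟩ : ∃ b0, (c :: g).drop g.length = [b0] := by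
        refine ⟨(c :: g).getLast (by simp), ?_⟩
        rw [List.drop_eq_getElem_cons (by simp)]
        simp [List.getLast_eq_getElem]
        rfl
      have hglen : ((c :: g).take g.length).length = g.length := by simp
      have hsplit : (c :: g) = (c :: g).take g.length ++ [b0] := by
        rw [← hdrop, List.take_append_drop]
      have hflen : (p ++ (c :: g).take g.length).length = p.length + g.length := by
        rw [List.length_append, hglen]
      have hss : (p ++ [c]) ++ g ++ done = (p ++ (c :: g).take g.length) ++ b0 :: done := by
        conv_lhs => rw [show (p ++ [c]) ++ g ++ done = p ++ ((c :: g) ++ done) from by simp, hsplit]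
        simp
      have e0 : (((p ++ [c]).length : Int)) + (g.length : Int) - 1
          = (((p ++ (c :: g).take g.length).length : Nat) : Int) := by
        rw [hflen]; simp; omega
      rw [hss, e0]
      set front := p ++ (c :: g).take g.length with hfront
      simp only [PySem.List.pySetD_natCast]
      rw [pvWrite1]
      rw [show (((p ++ [c]).length : Int)) - 1 - 1 = ((p.length : Int)) - 1 from by simp]
      rw [show ((front.length : Nat) : Int) - 1
        = ((p.length : Int)) + (((c :: g).take g.length).length : Int) - 1 from by
          rw [hflen, hglen]; push_cast; omega]
      rw [show front ++ c :: done = p ++ (c :: g).take g.length ++ ([c] ++ done) from by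
        rw [hfront]; simp]
      rw [ih _ _ (by rw [hglen]; omega)]
      simp [pvT, hd]


-- ===== VERDICT (by name: the statement is the Claim_ definition above) =====
theorem replace_element_spec : Claim_equal_replace_element := by
  intro s _
  unfold Spec_replace_element
  show String.ofList _ = String.ofList _
  have hcnt := pvCount_foldl s.toList 0
  rw [hcnt]
  have hB : s.toList.foldl
      (fun res ch => if '0' ≤ ch ∧ ch ≤ '9' then res ++ "number".toList else res ++ [ch]) []
      = s.toList.flatMap pvT := by
    have : (fun (res : List Char) (ch : Char) =>
        if '0' ≤ ch ∧ ch ≤ '9' then res ++ "number".toList else res ++ [ch])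
        = fun res ch => res ++ pvT ch := by
      funext res ch
      by_cases h : '0' ≤ ch ∧ ch ≤ '9' <;> simp [pvT, h]
    rw [this, PySem.List.foldl_append_eq_flatMap]
    simp
  rw [hB]
  have hrep : (5 * ((0 : Int) + (s.toList.countP fun ch => decide ('0' ≤ ch ∧ ch ≤ '9')))).toNat
      = 5 * (s.toList.countP fun ch => decide ('0' ≤ ch ∧ ch ≤ '9')) := by omega
  rw [hrep]
  have := pvLoop_inv s.toList (List.replicate (5 * (s.toList.countP fun ch => decide ('0' ≤ ch ∧ ch ≤ '9'))) '0') [] (by simp)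
  simp only [List.append_nil] at this
  rw [show (((s.toList ++ List.replicate (5 * (s.toList.countP fun ch => decide ('0' ≤ ch ∧ ch ≤ '9'))) '0').length : Nat) : Int) - 1
    = (s.toList.length : Int) + ((List.replicate (5 * (s.toList.countP fun ch => decide ('0' ≤ ch ∧ ch ≤ '9'))) '0').length : Int) - 1 from by
      simp only [List.length_append]; push_cast; ring]
  rw [this]
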